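-- pv_equiv track=rewrite | github.com/yagnesh77/python | mylist/list181.py | cyclically_iteration
-- ===== SOURCE A (Python) =====
-- def cyclically_iteration(lst,spec_index):
--     result = []
--     length = len(lst)
--     for i in range(length):
--         element_index = spec_index % length
--         result.append(lst[element_index])
--         spec_index += 1
--     return result
-- ===== SOURCE B (Python) =====
-- def cyclically_iteration(lst, spec_index):
--     if not lst:
--         return []
--     start = spec_index % len(lst)
--     return lst[start:] + lst[:start]
-- ===== Notes on version B (the rewrite author's own statement) =====
-- stated objective: idiomatic
-- what changed: Replaces the per-element append loop with running modular index by a single modulo computation and concatenation of two slices lst[start:] + lst[:start].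
import Mathlib
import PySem

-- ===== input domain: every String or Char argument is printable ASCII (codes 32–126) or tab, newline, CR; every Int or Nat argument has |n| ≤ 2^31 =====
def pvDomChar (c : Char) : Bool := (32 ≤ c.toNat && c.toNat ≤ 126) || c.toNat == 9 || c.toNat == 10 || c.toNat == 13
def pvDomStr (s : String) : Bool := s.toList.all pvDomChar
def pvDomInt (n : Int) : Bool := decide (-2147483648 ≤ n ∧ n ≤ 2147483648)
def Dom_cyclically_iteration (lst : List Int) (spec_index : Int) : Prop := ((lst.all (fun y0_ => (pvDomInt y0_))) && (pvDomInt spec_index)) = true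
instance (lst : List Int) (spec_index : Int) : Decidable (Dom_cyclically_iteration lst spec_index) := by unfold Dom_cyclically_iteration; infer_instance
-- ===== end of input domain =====

-- B builds the rotation as lst[start:] + lst[:start] with one modulo, instead of A's
-- per-element append loop with a running modular index (objective: idiomatic).

-- ===== PORT A =====
-- Loop over range(length), appending lst[spec_index % length] and incrementing spec_index.
-- lst[element_index] is ported with pyGetD: element_index = s % length always lies in
-- [0, length) when the loop body runs (length > 0), so Python never raises here and the
-- default is never used (exact).
def cyclically_iteration (lst : List Int) (spec_index : Int) : List Int :=
  let length : Int := lst.length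
  ((PySem.List.pyRange 0 length 1).foldl
    (fun (s : List Int × Int) _i =>
      (s.1 ++ [PySem.List.pyGetD lst (PySem.Int.mod s.2 length) 0], s.2 + 1))
    ([], spec_index)).1

-- ===== PORT B =====
def cyclically_iteration_alt (lst : List Int) (spec_index : Int) : List Int :=
  if lst.isEmpty then []
  else
    let start := PySem.Int.mod spec_index (lst.length : Int)
    PySem.List.slice lst (some start) none ++ PySem.List.slice lst none (some start)

-- ===== PRECONDITION & SPEC =====
def Spec_cyclically_iteration (lst : List Int) (spec_index : Int) (out : List Int) : Prop := out = cyclically_iteration_alt lst spec_index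
instance (lst : List Int) (spec_index : Int) (out : List Int) : Decidable (Spec_cyclically_iteration lst spec_index out) := by unfold Spec_cyclically_iteration; infer_instance

-- ===== CLAIM (what is proved, stated in full; the proofs are below) =====
def Claim_equal_cyclically_iteration : Prop := ∀ (lst : List Int) (spec_index : Int), Dom_cyclically_iteration lst spec_index → Spec_cyclically_iteration lst spec_index (cyclically_iteration lst spec_index)

-- ===== LEMMAS AND PROOFS =====

-- A's loop, run over any driving list r, appends lst[(k+j) % n] for j = 0 .. r.length-1.
theorem pvLoopSpec (lst : List Int) (n : Int) (r : List Int) :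
    ∀ (acc : List Int) (k : Int),
    ((r.foldl
      (fun (s : List Int × Int) _i =>
        (s.1 ++ [PySem.List.pyGetD lst (PySem.Int.mod s.2 n) 0], s.2 + 1))
      (acc, k)).1
    = acc ++ (List.range r.length).map
        (fun (j : Nat) => PySem.List.pyGetD lst (PySem.Int.mod (k + (j : Int)) n) 0)) := by
  induction r with
  | nil => intro acc k; simp
  | cons x xs ih =>
    intro acc k
    simp only [List.foldl_cons, List.length_cons]
    rw [ih, List.range_succ_eq_map, List.append_assoc]
    congr 1
    rw [List.map_cons, List.singleton_append, List.map_map]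
    congr 1
    · norm_num
    · apply List.map_congr_left
      intro j _
      simp only [Function.comp_apply]
      congr 2
      push_cast
      ring

-- Index arithmetic: for 0 < n, 0 ≤ j < n, (k + j) % n splits around s = k % n.
theorem pvModSplit (k : Int) (n : Int) (j : Int) (hn : 0 < n) (hj : 0 ≤ j) (hjn : j < n) :
    PySem.Int.mod (k + j) n =
      (if PySem.Int.mod k n + j < n then PySem.Int.mod k n + j else PySem.Int.mod k n + j - n) := by
  rw [PySem.Int.mod_eq_emod_of_pos hn, PySem.Int.mod_eq_emod_of_pos hn]
  have hs0 : 0 ≤ k % n := Int.emod_nonneg k (by omega)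
  have hsn : k % n < n := Int.emod_lt_of_pos k hn
  have h1 : (k + j) % n = (k % n + j) % n := by
    rw [Int.add_emod, Int.emod_eq_of_lt hj hjn]
  split_ifs with h
  · rw [h1]; exact Int.emod_eq_of_lt (by omega) h
  · have h2 : k % n + j = (k % n + j - n) + n * 1 := by ring
    conv_lhs => rw [h1, h2, Int.add_mul_emod_self_left]
    exact Int.emod_eq_of_lt (by omega) (by omega)

theorem cyclically_iteration_eq_alt (lst : List Int) (spec_index : Int) :
    cyclically_iteration lst spec_index = cyclically_iteration_alt lst spec_index := by
  by_cases hemp : lst = []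
  · subst hemp
    simp [cyclically_iteration, cyclically_iteration_alt, PySem.List.pyRange_one_eq_nil]
  · have hn : (0 : Int) < lst.length := by
      have := List.length_pos_iff.mpr hemp; omega
    unfold cyclically_iteration cyclically_iteration_alt
    have hne : lst.isEmpty ≠ true := by simp [hemp]
    rw [if_neg hne, pvLoopSpec]
    have hlen : (PySem.List.pyRange 0 (lst.length : Int) 1).length = lst.length := by
      rw [PySem.List.length_pyRange_one]; omega
    rw [hlen]
    set n : Int := (lst.length : Int) with hndef
    set sI : Int := PySem.Int.mod spec_index n with hsdef
    have hs0 : 0 ≤ sI := by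
      rw [hsdef, PySem.Int.mod_eq_emod_of_pos hn]
      exact Int.emod_nonneg _ (by omega)
    have hsn : sI < n := by
      rw [hsdef, PySem.Int.mod_eq_emod_of_pos hn]
      exact Int.emod_lt_of_pos _ hn
    simp only [PySem.List.slice_from lst hs0, PySem.List.slice_to lst hs0]
    set s : Nat := sI.toNat with hsnat
    have hsle : s ≤ lst.length := by omega
    simp only [List.nil_append]
    apply List.ext_getElem
    · simp [hsle]
    · intro i hi1 hi2
      rw [List.getElem_map, List.getElem_range]
      have hiN : i < lst.length := by simpa using hi1
      have hsplit := pvModSplit spec_index n i hn (by omega) (by rw [hndef]; exact_mod_cast hiN)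
      rw [← hsdef] at hsplit
      rw [hsplit]
      by_cases hcase : sI + (i : Int) < n
      · rw [if_pos hcase]
        rw [PySem.List.pyGetD_eq_getElem lst 0 (by omega) (by omega)]
        rw [List.getElem_append_left (by simp [List.length_drop]; omega)]
        rw [List.getElem_drop]
        congr 1
        omega
      · rw [if_neg hcase]
        rw [PySem.List.pyGetD_eq_getElem lst 0 (by omega) (by omega)]
        rw [List.getElem_append_right (by simp [List.length_drop]; omega)]
        rw [List.getElem_take]
        congr 1
        simp [List.length_drop]
        omega

-- ===== VERDICT (by name: the statement is the Claim_ definition above) =====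
theorem cyclically_iteration_spec : Claim_equal_cyclically_iteration := by
  intro lst spec_index _
  unfold Spec_cyclically_iteration
  exact cyclically_iteration_eq_alt lst spec_index
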